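-- pv_equiv track=rewrite | github.com/igruiz91/Codewars-HackerRank-LeetCode-CoderBite-freeCodeCamp | Codewars/Python/7 kyu/II/Cat Years, Dog Years (2).py | calcYears
-- ===== SOURCE A (Python) =====
-- def calcYears(n, a):
--     count = 2
--     i=0
--     while n > 0:
--       if count == 2:
--           n -= 15
--           count -= 1
--       elif count == 1:
--           n -= 9
--           count -= 1
--       else:
--           if a:
--               n -= 5
--           else:
--               n -= 4
--       if n<0: break
--       i+=1
--     return i
-- ===== SOURCE B (Python) =====
-- def calcYears(n, a):
--     # Closed form: first step costs 15, second 9, every later year 5 (cat) or 4 (dog).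
--     if n <= 0:
--         return 0
--     n -= 15
--     if n < 0:
--         return 0
--     if n == 0:
--         return 1
--     n -= 9
--     if n < 0:
--         return 1
--     return 2 + n // (5 if a else 4)
-- ===== Notes on version B (the rewrite author's own statement) =====
-- stated objective: faster
-- what changed: Replaced the O(n) subtraction loop by closed-form arithmetic: handle the 15- and 9-cost first two steps explicitly, then one integer division by the per-year cost (5 or 4).
import Mathlib
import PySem

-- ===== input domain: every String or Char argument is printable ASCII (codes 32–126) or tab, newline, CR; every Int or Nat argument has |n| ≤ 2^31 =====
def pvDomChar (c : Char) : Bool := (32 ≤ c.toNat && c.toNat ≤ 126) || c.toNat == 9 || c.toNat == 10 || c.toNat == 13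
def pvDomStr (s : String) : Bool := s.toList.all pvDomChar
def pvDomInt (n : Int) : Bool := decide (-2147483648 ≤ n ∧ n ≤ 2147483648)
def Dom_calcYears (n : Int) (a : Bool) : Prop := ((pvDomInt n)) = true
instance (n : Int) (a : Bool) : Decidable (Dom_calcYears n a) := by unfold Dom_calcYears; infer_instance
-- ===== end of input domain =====

-- ===== PORT A =====
-- loop of A: state (n, count, i); each branch subtracts, then 'if n<0: break' / 'i+=1'
def calcYearsLoop (n : Int) (count : Int) (i : Int) (a : Bool) : Int :=
  if h : n > 0 then
    if count = 2 then
      (if n - 15 < 0 then i else calcYearsLoop (n - 15) (count - 1) (i + 1) a)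
    else if count = 1 then
      (if n - 9 < 0 then i else calcYearsLoop (n - 9) (count - 1) (i + 1) a)
    else if a then
      (if n - 5 < 0 then i else calcYearsLoop (n - 5) count (i + 1) a)
    else
      (if n - 4 < 0 then i else calcYearsLoop (n - 4) count (i + 1) a)
  else i
termination_by n.toNat
decreasing_by all_goals omega

def calcYears (n : Int) (a : Bool) : Int := calcYearsLoop n 2 0 a

-- ===== PORT B =====
def calcYears_alt (n : Int) (a : Bool) : Int :=
  if n ≤ 0 then 0
  else if n - 15 < 0 then 0
  else if n - 15 = 0 then 1
  else if n - 15 - 9 < 0 then 1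
  else 2 + PySem.Int.floordiv (n - 15 - 9) (if a then 5 else 4)

-- ===== PRECONDITION & SPEC =====
def Spec_calcYears (n : Int) (a : Bool) (out : Int) : Prop := out = calcYears_alt n a
instance (n : Int) (a : Bool) (out : Int) : Decidable (Spec_calcYears n a out) := by unfold Spec_calcYears; infer_instance

-- ===== CLAIM (what is proved, stated in full; the proofs are below) =====
def Claim_equal_calcYears : Prop := ∀ (n : Int) (a : Bool), Dom_calcYears n a → Spec_calcYears n a (calcYears n a)

-- ===== LEMMAS AND PROOFS =====

-- Phase with count = 0: each iteration subtracts the fixed per-year cost (5 or 4).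
theorem loop_phase0 (a : Bool) (m i : Int) (hm : 0 ≤ m) :
    calcYearsLoop m 0 i a = i + m / (if a then 5 else 4) := by
  rw [calcYearsLoop]
  cases a
  · by_cases h : m > 0
    · rw [dif_pos h, if_neg (by decide : ¬ ((0 : Int) = 2)),
        if_neg (by decide : ¬ ((0 : Int) = 1)), if_neg (by decide : ¬ (false = true))]
      by_cases h4 : m - 4 < 0
      · rw [if_pos h4]
        simp only [Bool.false_eq_true, if_false]
        omega
      · rw [if_neg h4, loop_phase0 false (m - 4) (i + 1) (by omega)]
        simp only [Bool.false_eq_true, if_false]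
        omega
    · rw [dif_neg h]
      simp only [Bool.false_eq_true, if_false]
      omega
  · by_cases h : m > 0
    · rw [dif_pos h, if_neg (by decide : ¬ ((0 : Int) = 2)),
        if_neg (by decide : ¬ ((0 : Int) = 1)), if_pos (by decide : true = true)]
      by_cases h5 : m - 5 < 0
      · rw [if_pos h5]
        simp only [if_true]
        omega
      · rw [if_neg h5, loop_phase0 true (m - 5) (i + 1) (by omega)]
        simp only [if_true]
        omega
    · rw [dif_neg h]
      simp only [if_true]
      omega
termination_by m.toNat
decreasing_by all_goals omega

-- ===== VERDICT (by name: the statement is the Claim_ definition above) =====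
theorem calcYears_spec : Claim_equal_calcYears := by
  intro n a _
  unfold Spec_calcYears calcYears calcYears_alt
  rw [calcYearsLoop]
  by_cases h0 : n > 0
  · rw [dif_pos h0, if_pos (by decide : (2 : Int) = 2)]
    by_cases h1 : n - 15 < 0
    · rw [if_pos h1, if_neg (by omega : ¬ n ≤ 0), if_pos h1]
    · rw [if_neg h1, calcYearsLoop]
      by_cases h2 : n - 15 > 0
      · rw [dif_pos h2, if_neg (by decide : ¬ ((2 : Int) - 1 = 2)),
          if_pos (by decide : (2 : Int) - 1 = 1)]
        by_cases h3 : n - 15 - 9 < 0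
        · rw [if_pos h3, if_neg (by omega : ¬ n ≤ 0), if_neg h1,
            if_neg (by omega : ¬ n - 15 = 0), if_pos h3]
          norm_num
        · rw [if_neg h3]
          norm_num only
          rw [loop_phase0 a (n - 15 - 9) 2 (by omega),
            if_neg (by omega : ¬ n ≤ 0), if_neg h1, if_neg (by omega : ¬ n - 15 = 0),
            if_neg h3, PySem.Int.floordiv_eq_ediv_of_pos (by cases a <;> norm_num)]
      · rw [dif_neg h2]
        have hn : n = 15 := by omega
        subst hn
        norm_num
  · rw [dif_neg h0, if_pos (by omega : n ≤ 0)]
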